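-- pv_equiv track=rewrite | github.com/valentin-correa/UTN-2024 | 2°/Sintaxis y Semantica de los Lenguajes/Codes/Problema 4 SySL (lenguajes).py | conjunto
-- ===== SOURCE A (Python) =====
-- def conjunto(L1, L2):
--     combinacion = ""
--     for i in range(len(L1)):
--         if L1[i] not in {"{", "}"}:
--             if L1[i] == ",":
--                 combinacion += " "
--             else:
--                 combinacion += L1[i]
--     combinacion += " "
--     for i in range(len(L2)):
--         if L2[i] not in {"{", "}"}:
--             if L2[i] == ",":
--                 combinacion += " "
--             else:
--                 combinacion += L2[i]
--     return combinacion
-- ===== SOURCE B (Python) =====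
-- def conjunto(L1, L2):
--     def clean(s):
--         return s.replace("{", "").replace("}", "").replace(",", " ")
--     return clean(L1) + " " + clean(L2)
-- ===== Notes on version B (the rewrite author's own statement) =====
-- stated objective: idiomatic
-- what changed: Replaces the two index-based character scans that build the result one char at a time with a replace-chain cleaner (strip braces, comma to space) applied to each argument and concatenated.
import Mathlib
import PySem

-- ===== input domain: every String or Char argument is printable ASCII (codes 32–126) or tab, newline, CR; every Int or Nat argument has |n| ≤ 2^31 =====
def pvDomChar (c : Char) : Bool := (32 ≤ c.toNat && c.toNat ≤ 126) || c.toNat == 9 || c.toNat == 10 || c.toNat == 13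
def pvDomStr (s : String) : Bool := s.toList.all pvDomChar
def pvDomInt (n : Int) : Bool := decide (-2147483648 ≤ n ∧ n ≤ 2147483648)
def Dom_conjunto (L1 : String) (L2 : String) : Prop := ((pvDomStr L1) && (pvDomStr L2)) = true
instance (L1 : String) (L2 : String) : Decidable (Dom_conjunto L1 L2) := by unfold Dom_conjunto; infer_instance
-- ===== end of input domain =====

-- B replaces the two index-based character scans with a replace-chain cleaner applied to each argument (idiomatic).


-- ===== PORT A =====
-- the body of 'for i in range(len(s)): …' shared by the two loops of A
def conjuntoLoop (s : String) (acc : List Char) : List Char :=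
  (PySem.List.pyRange 0 (PySem.Str.len s) 1).foldl
    (fun acc i =>
      if PySem.List.pyGetD s.toList i ' ' = '{' ∨ PySem.List.pyGetD s.toList i ' ' = '}' then acc
      else if PySem.List.pyGetD s.toList i ' ' = ',' then acc ++ [' ']
      else acc ++ [PySem.List.pyGetD s.toList i ' '])
    acc

def conjunto (L1 : String) (L2 : String) : String :=
  String.ofList (conjuntoLoop L2 (conjuntoLoop L1 [] ++ [' ']))

-- ===== PORT B =====
def conjuntoClean (s : String) : String :=
  PySem.Str.replace (PySem.Str.replace (PySem.Str.replace s "{" "") "}" "") "," " "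

def conjunto_alt (L1 : String) (L2 : String) : String :=
  conjuntoClean L1 ++ " " ++ conjuntoClean L2

-- ===== PRECONDITION & SPEC =====
def Spec_conjunto (L1 : String) (L2 : String) (out : String) : Prop := out = conjunto_alt L1 L2
instance (L1 : String) (L2 : String) (out : String) : Decidable (Spec_conjunto L1 L2 out) := by unfold Spec_conjunto; infer_instance

-- ===== CLAIM (what is proved, stated in full; the proofs are below) =====
def Claim_equal_conjunto : Prop := ∀ (L1 : String) (L2 : String), Dom_conjunto L1 L2 → Spec_conjunto L1 L2 (conjunto L1 L2)

-- ===== LEMMAS AND PROOFS =====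

-- single-char deletion: s.replace(o, "") keeps exactly the characters ≠ o
theorem replaceGo_del (o : Char) : ∀ (fuel : Nat) (l acc : List Char), l.length ≤ fuel →
    PySem.Chars.replace.go [o] [] fuel l acc = acc.reverse ++ l.filter (· ≠ o) := by
  intro fuel
  induction fuel with
  | zero => intro l acc h; cases l with
    | nil => simp [PySem.Chars.replace.go]
    | cons c t => simp at h
  | succ n ih =>
    intro l acc h
    cases l with
    | nil => simp [PySem.Chars.replace.go]
    | cons c t =>
      simp only [PySem.Chars.replace.go]
      by_cases hc : c = o
      · simp [hc, List.isPrefixOf, ih t acc (by simpa using h)]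
      · have hco : o ≠ c := fun h' => hc h'.symm
        simp [List.isPrefixOf, hc, hco, ih t (c :: acc) (by simpa using h)]

theorem replace_del (s : List Char) (o : Char) :
    PySem.Chars.replace s [o] [] = s.filter (· ≠ o) := by
  simp [PySem.Chars.replace, List.isEmpty, replaceGo_del o s.length s [] (le_refl _)]

-- single-char substitution: s.replace(o, n) maps o to n
theorem replaceGo_map (o n : Char) : ∀ (fuel : Nat) (l acc : List Char), l.length ≤ fuel →
    PySem.Chars.replace.go [o] [n] fuel l acc = acc.reverse ++ l.map (fun c => if c = o then n else c) := by
  intro fuel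
  induction fuel with
  | zero => intro l acc h; cases l with
    | nil => simp [PySem.Chars.replace.go]
    | cons c t => simp at h
  | succ m ih =>
    intro l acc h
    cases l with
    | nil => simp [PySem.Chars.replace.go]
    | cons c t =>
      simp only [PySem.Chars.replace.go]
      by_cases hc : c = o
      · simp [hc, List.isPrefixOf, ih t (n :: acc) (by simpa using h)]
      · have hco : o ≠ c := fun h' => hc h'.symm
        simp [List.isPrefixOf, hc, hco, ih t (c :: acc) (by simpa using h)]

theorem replace_map (s : List Char) (o n : Char) :
    PySem.Chars.replace s [o] [n] = s.map (fun c => if c = o then n else c) := by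
  simp [PySem.Chars.replace, List.isEmpty, replaceGo_map o n s.length s [] (le_refl _)]

-- the per-character action of A's loop, as a flatMap
def conjuntoStep (c : Char) : List Char :=
  if c = '{' ∨ c = '}' then [] else if c = ',' then [' '] else [c]

theorem conjuntoLoop_eq (s : String) (acc : List Char) :
    conjuntoLoop s acc = acc ++ s.toList.flatMap conjuntoStep := by
  unfold conjuntoLoop
  simp only [PySem.Str.len_eq]
  rw [PySem.List.foldl_pyRange_zero_pyGetD' s.toList ' '
    (fun acc c => if c = '{' ∨ c = '}' then acc else if c = ',' then acc ++ [' '] else acc ++ [c]) acc]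
  induction s.toList generalizing acc with
  | nil => simp
  | cons c t ih => simp [conjuntoStep, ih]; split_ifs <;> simp

theorem flatMap_eq_clean (l : List Char) :
    l.flatMap conjuntoStep
      = ((l.filter (· ≠ '{')).filter (· ≠ '}')).map (fun c => if c = ',' then ' ' else c) := by
  induction l with
  | nil => simp
  | cons c t ih =>
    simp only [List.flatMap_cons, List.filter_cons, ih, conjuntoStep]
    split_ifs <;> simp_all

theorem clean_toList (s : String) :
    (conjuntoClean s).toList
      = ((s.toList.filter (· ≠ '{')).filter (· ≠ '}')).map (fun c => if c = ',' then ' ' else c) := by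
  simp [conjuntoClean, PySem.Str.toList_replace, replace_del, replace_map]

-- ===== VERDICT (by name: the statement is the Claim_ definition above) =====
theorem conjunto_spec : Claim_equal_conjunto := by
  intro L1 L2 _
  unfold Spec_conjunto
  apply String.ext  -- equality of the underlying char lists
  simp [conjunto, conjunto_alt, conjuntoLoop_eq, flatMap_eq_clean, clean_toList,
    String.toList_ofList]
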